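-- pv_equiv track=rewrite | github.com/seoyoung059/algorithm | 프로그래머스/lv2/12913. 땅따먹기/땅따먹기.py | solution
-- ===== SOURCE A (Python) =====
-- def solution(land):
--     answer = 0
--     row = len(land)
--     for j in range(1,row):
--         for i in range(4):
--             upper_row = land[j-1][:i]+land[j-1][i+1:]
--             land[j][i] = land[j][i] + max(upper_row)
--     answer = max(land[row-1])
--     return answer
-- ===== SOURCE B (Python) =====
-- def solution(land):
--     # Note: A mutates land in place; B does not mutate (return-value equivalence only).
--     prev = land[0]
--     for row in land[1:]:
--         w, x, y, z = row
--         top1 = max(prev)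
--         idx = prev.index(top1)
--         top2 = max(prev[:idx] + prev[idx + 1:])
--         prev = [w + (top2 if idx == 0 else top1),
--                 x + (top2 if idx == 1 else top1),
--                 y + (top2 if idx == 2 else top1),
--                 z + (top2 if idx == 3 else top1)]
--     return max(prev)
-- ===== Notes on version B (the rewrite author's own statement) =====
-- stated objective: alternative
-- what changed: B replaces A's per-column reslice-and-rescan of the previous row (building land[j-1] with column i removed and taking its max, for each of the 4 columns) by computing the previous row's maximum, its first index and the second maximum once per row and reusing them for all 4 columns; B also builds fresh rows instead of mutating land in place (return-value equivalence; A mutates its argument).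
-- outside the precondition, e.g. on solution([[1, 2], [1, 2, 3, 4, 5]]): A returns 6, B raises ValueError
import Mathlib
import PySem

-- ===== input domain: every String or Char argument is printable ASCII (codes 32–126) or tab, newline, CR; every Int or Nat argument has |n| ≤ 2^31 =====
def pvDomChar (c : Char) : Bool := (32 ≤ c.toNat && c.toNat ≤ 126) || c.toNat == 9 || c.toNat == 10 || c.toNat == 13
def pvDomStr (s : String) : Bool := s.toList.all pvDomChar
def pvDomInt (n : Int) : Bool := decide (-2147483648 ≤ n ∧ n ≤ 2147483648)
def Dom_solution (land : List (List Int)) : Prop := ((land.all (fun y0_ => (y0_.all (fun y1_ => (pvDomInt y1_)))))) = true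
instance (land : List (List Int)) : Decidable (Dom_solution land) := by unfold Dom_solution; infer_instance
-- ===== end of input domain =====

-- B computes the previous row's top-two maxima (with first-max index) once per row and reuses
-- them for all 4 columns, instead of A's reslice-and-rescan per column; B does not mutate its
-- argument (A does; the equivalence proved here is about the return value only).


-- ===== PORT A =====
-- land[j][i] = land[j][i] + max(land[j-1][:i] + land[j-1][i+1:])  (one column i of row j)
def pvInnerA (j : Int) (L : List (List Int)) (i : Int) : List (List Int) :=
  let prev := (PySem.List.pyGet? L (j - 1)).getD []
  let upper := PySem.List.slice prev none (some i) ++ PySem.List.slice prev (some (i + 1)) none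
  let cur := (PySem.List.pyGet? L j).getD []
  let v := (PySem.List.pyGet? cur i).getD 0 + (PySem.List.max? upper id).getD 0
  L.set j.toNat (cur.set i.toNat v)

-- the body of A's outer loop: 'for i in range(4): …'
def pvOuterA (L : List (List Int)) (j : Int) : List (List Int) :=
  (PySem.List.pyRange 0 4 1).foldl (pvInnerA j) L

def solution (land : List (List Int)) : Int :=
  let row : Int := land.length
  let land2 := (PySem.List.pyRange 1 row 1).foldl pvOuterA land
  (PySem.List.max? ((PySem.List.pyGet? land2 (row - 1)).getD []) id).getD 0

-- ===== PORT B =====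
-- one row of B: unpack the 4 columns, compute top1 / first max index / top2 of prev once
def pvStepB (prev row : List Int) : List Int :=
  match row with
  | [w, x, y, z] =>
    let top1 := (PySem.List.max? prev id).getD 0
    let idx : Int := ((PySem.List.index? prev top1).getD 0 : Nat)
    let top2 := (PySem.List.max? (PySem.List.slice prev none (some idx) ++
                 PySem.List.slice prev (some (idx + 1)) none) id).getD 0
    [w + (if idx = 0 then top2 else top1), x + (if idx = 1 then top2 else top1),
     y + (if idx = 2 then top2 else top1), z + (if idx = 3 then top2 else top1)]
  | _ => []   -- Python B raises ValueError (unpacking) here (outside Pre_)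

def solution_alt (land : List (List Int)) : Int :=
  match land with
  | [] => 0   -- Python B raises IndexError here (outside Pre_)
  | first :: rest => (PySem.List.max? (rest.foldl pvStepB first) id).getD 0

-- ===== PRECONDITION & SPEC =====
-- Pre_ restricts to the task's natural domain: a nonempty grid whose rows after the first have
-- exactly 4 columns (the first row may be any nonempty row, of length ≥ 2 when more rows follow).
-- Outside it A raises on most shapes (empty grid, rows too short) and B's 4-way unpacking raises
-- on any later row whose length is not 4; on later rows wider than 4 A still returns, but its
-- value (columns past the fourth left unaugmented yet included in the final max) is an artefact
-- of its fixed range(4) loop, and B raises there.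
def Pre_solution (land : List (List Int)) : Prop :=
  land ≠ [] ∧ (∀ r ∈ land.tail, r.length = 4) ∧
    1 ≤ (land.headD []).length ∧ (1 < land.length → 2 ≤ (land.headD []).length)
instance (land : List (List Int)) : Decidable (Pre_solution land) := by
  unfold Pre_solution; infer_instance

def pvWitness_solution : List (List Int) := [[1, 2, 3, 4], [5, 6, 7, 8], [4, 3, 2, 1]]

def Spec_solution (land : List (List Int)) (out : Int) : Prop := out = solution_alt land
instance (land : List (List Int)) (out : Int) : Decidable (Spec_solution land out) := by
  unfold Spec_solution; infer_instance

-- ===== CLAIM (what is proved, stated in full; the proofs are below) =====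
def Claim_equal_solution : Prop :=
  ∀ (land : List (List Int)), Dom_solution land → Pre_solution land →
    Spec_solution land (solution land)

-- ===== LEMMAS AND PROOFS =====

-- B's rows, one per processed row of A (proof-side scan of pvStepB)
def pvScanA (p : List Int) : List (List Int) → List (List Int)
  | [] => []
  | r :: R => pvStepB p r :: pvScanA (pvStepB p r) R

-- the three per-row quantities of B, as standalone functions (pvStepB is their let-packaging)
def pvTop1 (p : List Int) : Int := (PySem.List.max? p id).getD 0
def pvIdx (p : List Int) : Int := ((PySem.List.index? p (pvTop1 p)).getD 0 : Nat)
def pvTop2 (p : List Int) : Int :=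
  (PySem.List.max? (PySem.List.slice p none (some (pvIdx p)) ++
    PySem.List.slice p (some (pvIdx p + 1)) none) id).getD 0

theorem pvLen4 (l : List Int) (h : l.length = 4) : ∃ a b c d, l = [a, b, c, d] := by
  match l, h with
  | [a, b, c, d], _ => exact ⟨a, b, c, d, rfl⟩

theorem pvGetMid {α : Type} (P : List α) (x y : α) (Y : List α) :
    PySem.List.pyGet? (P ++ x :: y :: Y) ((P.length : Int) + 1) = some y := by
  have h : ((P.length : Int) + 1) = ((P.length + 1 : Nat) : Int) := by push_cast; ring
  rw [h, PySem.List.pyGet?_natCast, List.getElem?_append_right (by omega)]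
  simp

theorem pvGetAt {α : Type} (P : List α) (x : α) (Y : List α) :
    PySem.List.pyGet? (P ++ x :: Y) ((P.length : Int)) = some x := by
  rw [PySem.List.pyGet?_natCast, List.getElem?_append_right (by omega)]
  simp

theorem pvSetMid {α : Type} (P : List α) (x y z : α) (Y : List α) :
    (P ++ x :: y :: Y).set (P.length + 1) z = P ++ x :: z :: Y := by
  rw [List.set_append_right _ _ (by omega)]
  simp

theorem pvInnerStep (P : List (List Int)) (p cur : List Int) (R : List (List Int)) (i : Int) :
    pvInnerA ((P.length : Int) + 1) (P ++ p :: cur :: R) i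
      = P ++ p :: (cur.set i.toNat ((PySem.List.pyGet? cur i).getD 0 +
          (PySem.List.max? (PySem.List.slice p none (some i) ++
            PySem.List.slice p (some (i + 1)) none) id).getD 0)) :: R := by
  unfold pvInnerA
  have h1 : ((P.length : Int) + 1 - 1) = (P.length : Int) := by ring
  have h2 : ((P.length : Int) + 1).toNat = P.length + 1 := by omega
  rw [h1, pvGetAt, pvGetMid, h2, pvSetMid]
  rfl

theorem pvMaxChar (p : List Int) (hne : p ≠ []) :
    ∃ m, PySem.List.max? p id = some m ∧ m ∈ p ∧ ∀ y ∈ p, y ≤ m := by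
  cases hmo : PySem.List.max? p id with
  | none => exact absurd ((PySem.List.max?_eq_none_iff p id).mp hmo) hne
  | some m =>
    exact ⟨m, rfl, PySem.List.max?_mem hmo, fun y hy => by simpa using PySem.List.max?_isMax hmo y hy⟩

theorem pvMaxEqOf (L : List Int) (m : Int) (hm : m ∈ L) (hub : ∀ y ∈ L, y ≤ m) :
    PySem.List.max? L id = some m := by
  obtain ⟨m', hm', hmem', hub'⟩ := pvMaxChar L (List.ne_nil_of_mem hm)
  have h1 : m' ≤ m := hub m' hmem'
  have h2 : m ≤ m' := hub' m hm
  rw [hm', le_antisymm h1 h2]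

-- removing any position other than the (first) max position keeps the max value
theorem pvRemoveMax (p : List Int) (m : Int) (k : Nat) (i : Int)
    (hk : k < p.length) (hpk : p[k] = m) (hub : ∀ y ∈ p, y ≤ m)
    (hne : i ≠ (k : Int)) (h0 : 0 ≤ i) :
    PySem.List.max? (PySem.List.slice p none (some i) ++
      PySem.List.slice p (some (i + 1)) none) id = some m := by
  rw [PySem.List.slice_to p h0, PySem.List.slice_from p (by omega : (0:Int) ≤ i + 1)]
  apply pvMaxEqOf
  · by_cases hlt : (k : Int) < i
    · apply List.mem_append_left
      have hk' : k < (List.take i.toNat p).length := by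
        simp [List.length_take]; omega
      have := List.getElem_take (xs := p) (j := i.toNat) (i := k) (h := hk')
      rw [hpk] at this
      exact this ▸ List.getElem_mem hk'
    · have hki : (i + 1).toNat ≤ k := by omega
      apply List.mem_append_right
      have hk' : k - (i + 1).toNat < (List.drop (i + 1).toNat p).length := by
        simp [List.length_drop]; omega
      refine List.mem_iff_getElem.mpr ⟨k - (i + 1).toNat, hk', ?_⟩
      rw [List.getElem_drop]
      have hgen : ∀ (j : Nat) (hj : j < p.length), j = k → p[j] = m := by
        intro j hj hj'; subst hj'; exact hpk
      exact hgen _ _ (by omega)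
  · intro y hy
    rcases List.mem_append.mp hy with h' | h'
    · exact hub y (List.mem_of_mem_take h')
    · exact hub y (List.mem_of_mem_drop h')

-- one column's addend: A's "max of prev with position i removed" equals B's top1/top2 rule
theorem pvColAdd (p : List Int) (hp : 2 ≤ p.length) (i : Int) (h0 : 0 ≤ i) :
    (PySem.List.max? (PySem.List.slice p none (some i) ++
        PySem.List.slice p (some (i + 1)) none) id).getD 0
      = if pvIdx p = i then pvTop2 p else pvTop1 p := by
  obtain ⟨m, hm, hmem, hub⟩ := pvMaxChar p (by intro h; subst h; simp at hp)
  have htop1 : pvTop1 p = m := by simp [pvTop1, hm]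
  obtain ⟨k, hk⟩ := Option.isSome_iff_exists.mp (List.isSome_idxOf?.mpr hmem)
  obtain ⟨hklt, hpk, _⟩ := List.idxOf?_eq_some_iff.mp hk
  have hidx : pvIdx p = (k : Int) := by simp [pvIdx, PySem.List.index?, htop1, hk]
  by_cases hi : pvIdx p = i
  · rw [if_pos hi]
    simp only [pvTop2, hi]
  · rw [if_neg hi, htop1]
    rw [pvRemoveMax p m k i hklt hpk hub (by rw [hidx] at hi; exact fun h => hi h.symm) h0]
    rfl

theorem pvRowGen (p : List Int) (hp : 2 ≤ p.length) (w x y z : Int) :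
    [w + (PySem.List.max? (PySem.List.slice p none (some 0) ++
            PySem.List.slice p (some (0 + 1)) none) id).getD 0,
     x + (PySem.List.max? (PySem.List.slice p none (some 1) ++
            PySem.List.slice p (some (1 + 1)) none) id).getD 0,
     y + (PySem.List.max? (PySem.List.slice p none (some 2) ++
            PySem.List.slice p (some (2 + 1)) none) id).getD 0,
     z + (PySem.List.max? (PySem.List.slice p none (some 3) ++
            PySem.List.slice p (some (3 + 1)) none) id).getD 0]
      = pvStepB p [w, x, y, z] := by
  have hB : pvStepB p [w, x, y, z]
      = [w + (if pvIdx p = 0 then pvTop2 p else pvTop1 p),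
         x + (if pvIdx p = 1 then pvTop2 p else pvTop1 p),
         y + (if pvIdx p = 2 then pvTop2 p else pvTop1 p),
         z + (if pvIdx p = 3 then pvTop2 p else pvTop1 p)] := rfl
  rw [hB, pvColAdd p hp 0 (by norm_num), pvColAdd p hp 1 (by norm_num),
    pvColAdd p hp 2 (by norm_num), pvColAdd p hp 3 (by norm_num)]

set_option maxRecDepth 8000 in
theorem pvInner (P : List (List Int)) (p r : List Int) (R : List (List Int))
    (hp : 2 ≤ p.length) (hr : r.length = 4) :
    pvOuterA (P ++ p :: r :: R) ((P.length : Int) + 1) = P ++ p :: pvStepB p r :: R := by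
  obtain ⟨w, x, y, z, rfl⟩ := pvLen4 r hr
  unfold pvOuterA
  rw [show PySem.List.pyRange 0 4 1 = [0, 1, 2, 3] from by decide]
  simp only [List.foldl_cons, List.foldl_nil, pvInnerStep]
  refine Eq.trans ?_ (congrArg (fun row => P ++ p :: row :: R) (pvRowGen p hp w x y z))
  rfl

theorem pvStepBLen (p r : List Int) (hr : r.length = 4) : (pvStepB p r).length = 4 := by
  obtain ⟨a, b, c, d, rfl⟩ := pvLen4 r hr
  rfl

theorem pvOuter : ∀ (R P : List (List Int)) (p : List Int), P.getLast? = some p →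
    2 ≤ p.length → (∀ r ∈ R, r.length = 4) →
    (PySem.List.pyRange (P.length : Int) ((P.length : Int) + (R.length : Int)) 1).foldl pvOuterA (P ++ R)
      = P ++ pvScanA p R := by
  intro R
  induction R with
  | nil =>
    intro P p _ _ _
    rw [PySem.List.pyRange_one_eq_nil (by simp)]
    simp [pvScanA]
  | cons r R ih =>
    intro P p hlast hp hlen
    obtain ⟨P', rfl⟩ := List.getLast?_eq_some_iff.mp hlast
    rw [PySem.List.pyRange_one_cons (by simp)]
    simp only [List.foldl_cons]
    have e1 : (((P' ++ [p]).length : Int)) = (P'.length : Int) + 1 := by simp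
    have e2 : (P' ++ [p]) ++ r :: R = P' ++ p :: r :: R := by simp
    rw [e1, e2, pvInner P' p r R hp (hlen r (by simp))]
    have e3 : P' ++ p :: pvStepB p r :: R = ((P' ++ [p]) ++ [pvStepB p r]) ++ R := by simp
    have e4 : PySem.List.pyRange ((P'.length : Int) + 1 + 1)
        ((P'.length : Int) + 1 + ((r :: R).length : Int)) 1
        = PySem.List.pyRange ((((P' ++ [p]) ++ [pvStepB p r]).length : Int))
            (((((P' ++ [p]) ++ [pvStepB p r]).length : Int)) + (R.length : Int)) 1 := by
      congr 1 <;> (simp; ring)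
    rw [e3, e4, ih ((P' ++ [p]) ++ [pvStepB p r]) (pvStepB p r) (by simp)
      (by rw [pvStepBLen p r (hlen r (by simp))]; norm_num) (fun s hs => hlen s (by simp [hs]))]
    simp [pvScanA]

theorem pvScanLast : ∀ (R : List (List Int)) (p : List Int),
    (p :: pvScanA p R)[R.length]? = some (R.foldl pvStepB p) := by
  intro R
  induction R with
  | nil => intro p; rfl
  | cons r R ih =>
    intro p
    simpa [pvScanA] using ih (pvStepB p r)

-- ===== VERDICT (by name: the statement is the Claim_ definition above) =====
theorem solution_spec : Claim_equal_solution := by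
  intro land _ hpre
  obtain ⟨hne, htail, hhead1, hhead2⟩ := hpre
  match land, hne with
  | first :: rest, _ =>
    match rest with
    | [] => rfl
    | r :: rest' =>
      unfold Spec_solution solution solution_alt
      have hfirst : 2 ≤ first.length := by
        simpa using hhead2 (by simp)
      have hconv : PySem.List.pyRange 1 ((first :: r :: rest').length : Int) 1
          = PySem.List.pyRange (([first] : List (List Int)).length : Int)
              ((([first] : List (List Int)).length : Int) + ((r :: rest').length : Int)) 1 := by
        congr 1 <;> (simp; ring)
      simp only [hconv]
      rw [show (first :: r :: rest') = [first] ++ (r :: rest') from rfl,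
        pvOuter (r :: rest') [first] first rfl hfirst (fun s hs => htail s (by simpa using hs))]
      have hidx : (((first :: r :: rest').length : Int) - 1) = (((r :: rest').length : Nat) : Int) := by
        simp
      simp only [List.singleton_append, hidx, PySem.List.pyGet?_natCast, pvScanLast]
      rfl
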